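-- pv_equiv track=rewrite | github.com/carlosmduque/vertex-model-python | utilities.py | find_directed_edges_per_face
-- ===== SOURCE A (Python) =====
-- def find_directed_edges_per_face(num_sides_list):
--     """ Defines and ordered list of directed (half) edge indices
--         around a face given a list containing the number of sides of
--         each polygonal face.
--
--         Note: The edge indices are defined based on the order in which
--         the polygonal faces are listed.
--
--         Parameters:
--         -----------
--         num_sides_list : list, shape: (N,)
--             List with the number of sides of each polygonal face.
--
--         Returns:
--         -----------
--         edge_indices_per_face : dict, (face_id, [sorted dir_edges])
--             Dictionary containing the ordered edge indices of each face.
--     """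
--     edge_counter = 0
--     edge_indices_per_face = {}
--
--     for idx,num_sides in enumerate(num_sides_list):
--         range_list = list(range(edge_counter, edge_counter + num_sides))
--
--         edge_indices_per_face[idx] = range_list
--         edge_counter += num_sides
--
--     return edge_indices_per_face
-- ===== SOURCE B (Python) =====
-- def find_directed_edges_per_face(num_sides_list):
--     # First pass: prefix-offset table of cumulative edge-start indices.
--     offsets = [0]
--     for num_sides in num_sides_list:
--         offsets.append(offsets[-1] + num_sides)
--     # Second pass: shape each face's consecutive range from its offset.
--     return {idx: list(range(offsets[idx], offsets[idx] + num_sides))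
--             for idx, num_sides in enumerate(num_sides_list)}
-- ===== Notes on version B (the rewrite author's own statement) =====
-- stated objective: alternative
-- what changed: Replaces the single loop threading a running edge_counter through dict insertions by two separate passes: first build a prefix-offset table of cumulative edge-start indices, then a dict comprehension shapes each face's range by indexing that table.
import Mathlib
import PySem

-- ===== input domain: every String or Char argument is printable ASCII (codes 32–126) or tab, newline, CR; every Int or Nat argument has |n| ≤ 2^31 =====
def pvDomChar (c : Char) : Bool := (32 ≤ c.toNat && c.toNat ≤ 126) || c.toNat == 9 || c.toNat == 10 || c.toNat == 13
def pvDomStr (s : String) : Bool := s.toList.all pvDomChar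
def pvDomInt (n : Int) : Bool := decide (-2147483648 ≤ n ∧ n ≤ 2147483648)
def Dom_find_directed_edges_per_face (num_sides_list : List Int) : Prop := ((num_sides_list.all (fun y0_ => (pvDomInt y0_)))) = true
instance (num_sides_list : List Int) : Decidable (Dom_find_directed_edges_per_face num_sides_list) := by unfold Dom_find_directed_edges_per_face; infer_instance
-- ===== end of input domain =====

-- B builds a prefix-offset table in a first pass, then shapes each face's range from it,
-- instead of threading one running edge_counter through the dict-building loop (objective: alternative).

-- ===== PORT A =====
-- Python dict insert (overwrite in place, new keys append) on the association list
def pvDictInsert (d : List (Int × List Int)) (k : Int) (v : List Int) : List (Int × List Int) :=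
  match d with
  | [] => [(k, v)]
  | (k', v') :: rest => if k' = k then (k, v) :: rest else (k', v') :: pvDictInsert rest k v

def find_directed_edges_per_face (num_sides_list : List Int) : List (Int × List Int) :=
  ((PySem.List.enumerate num_sides_list 0).foldl
    (fun st p =>
      (st.1 + p.2, pvDictInsert st.2 p.1 (PySem.List.pyRange st.1 (st.1 + p.2) 1)))
    ((0 : Int), ([] : List (Int × List Int)))).2

-- ===== PORT B =====
-- offsets[-1] is exact here: the accumulator list is never empty
def pvOffsets (num_sides_list : List Int) : List Int :=
  num_sides_list.foldl (fun acc n => acc ++ [PySem.List.pyGetD acc (-1) 0 + n]) [0]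

def find_directed_edges_per_face_alt (num_sides_list : List Int) : List (Int × List Int) :=
  let offsets := pvOffsets num_sides_list
  (PySem.List.enumerate num_sides_list 0).map (fun p =>
    let o := PySem.List.pyGetD offsets p.1 0
    (p.1, PySem.List.pyRange o (o + p.2) 1))

-- ===== PRECONDITION & SPEC =====
def Spec_find_directed_edges_per_face (num_sides_list : List Int) (out : List (Int × List Int)) : Prop := out = find_directed_edges_per_face_alt num_sides_list
instance (num_sides_list : List Int) (out : List (Int × List Int)) : Decidable (Spec_find_directed_edges_per_face num_sides_list out) := by unfold Spec_find_directed_edges_per_face; infer_instance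

-- ===== CLAIM (what is proved, stated in full; the proofs are below) =====
def Claim_equal_find_directed_edges_per_face : Prop := ∀ (num_sides_list : List Int), Dom_find_directed_edges_per_face num_sides_list → Spec_find_directed_edges_per_face num_sides_list (find_directed_edges_per_face num_sides_list)

-- ===== LEMMAS AND PROOFS =====

-- common reference: the list of (face index, its edge range), counter c, first index s
def pvRef (c : Int) (l : List Int) (s : Int) : List (Int × List Int) :=
  match l with
  | [] => []
  | n :: t => (s, PySem.List.pyRange c (c + n) 1) :: pvRef (c + n) t (s + 1)

def pvScan (x : Int) (l : List Int) : List Int :=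
  match l with
  | [] => []
  | n :: t => (x + n) :: pvScan (x + n) t

theorem pvDictInsert_fresh (d : List (Int × List Int)) (k : Int) (v : List Int)
    (h : ∀ p ∈ d, p.1 ≠ k) : pvDictInsert d k v = d ++ [(k, v)] := by
  induction d with
  | nil => rfl
  | cons q rest ih =>
    obtain ⟨k', v'⟩ := q
    have hk : k' ≠ k := h (k', v') (by simp)
    simp [pvDictInsert, hk, ih (fun p hp => h p (by simp [hp]))]

theorem pvA_loop (l : List Int) : ∀ (s c : Int) (d : List (Int × List Int)),
    (∀ p ∈ d, p.1 < s) →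
    ((PySem.List.enumerate l s).foldl
      (fun st p =>
        (st.1 + p.2, pvDictInsert st.2 p.1 (PySem.List.pyRange st.1 (st.1 + p.2) 1)))
      (c, d)).2 = d ++ pvRef c l s := by
  induction l with
  | nil => intro s c d _; simp [PySem.List.enumerate_nil, pvRef]
  | cons n t ih =>
    intro s c d hd
    rw [PySem.List.enumerate_cons]
    simp only [List.foldl_cons]
    rw [pvDictInsert_fresh d s _ (fun p hp => ne_of_lt (hd p hp)),
        ih (s + 1) (c + n) _ (by
          intro p hp
          rcases List.mem_append.mp hp with h | h
          · exact lt_trans (hd p h) (by omega)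
          · rcases List.mem_singleton.mp h with rfl; exact lt_add_one s)]
    simp [pvRef]

theorem pvOff_loop (l : List Int) : ∀ (acc : List Int) (x : Int),
    l.foldl (fun acc n => acc ++ [PySem.List.pyGetD acc (-1) 0 + n]) (acc ++ [x])
      = (acc ++ [x]) ++ pvScan x l := by
  induction l with
  | nil => intro acc x; simp [pvScan]
  | cons n t ih =>
    intro acc x
    simp only [List.foldl_cons, PySem.List.pyGetD_neg_one_append_singleton]
    rw [show acc ++ [x] ++ [x + n] = (acc ++ [x]) ++ [x + n] from rfl, ih (acc ++ [x]) (x + n)]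
    simp [pvScan]

theorem pvOffsets_eq (l : List Int) : pvOffsets l = 0 :: pvScan 0 l := by
  have := pvOff_loop l [] 0
  simpa [pvOffsets] using this

theorem pvB_loop (l : List Int) : ∀ (off : List Int) (s c : Int), 0 ≤ s →
    off.drop s.toNat = c :: pvScan c l →
    (PySem.List.enumerate l s).map (fun p =>
      (p.1, PySem.List.pyRange (PySem.List.pyGetD off p.1 0)
            (PySem.List.pyGetD off p.1 0 + p.2) 1)) = pvRef c l s := by
  induction l with
  | nil => intro off s c _ _; simp [PySem.List.enumerate_nil, pvRef]
  | cons n t ih =>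
    intro off s c hs hdrop
    have hlen : s.toNat < off.length := by
      by_contra h
      rw [List.drop_eq_nil_of_le (by omega)] at hdrop
      simp at hdrop
    have hget : off[s.toNat] = c := by
      have h0 : (off.drop s.toNat)[0]'(by simp [hdrop]) = c := by simp [hdrop]
      simpa using h0
    have ho : PySem.List.pyGetD off s 0 = c := by
      rw [PySem.List.pyGetD_eq_getElem off 0 hs (by omega), hget]
    rw [PySem.List.enumerate_cons]
    simp only [List.map_cons, ho]
    rw [ih off (s + 1) (c + n) (by omega) (by
      have : off.drop ((s : Int) + 1).toNat = (off.drop s.toNat).drop 1 := by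
        rw [List.drop_drop]; congr 1; omega
      rw [this, hdrop]
      simp [pvScan])]
    simp [pvRef]

-- ===== VERDICT (by name: the statement is the Claim_ definition above) =====
theorem find_directed_edges_per_face_spec : Claim_equal_find_directed_edges_per_face := by
  intro l _
  unfold Spec_find_directed_edges_per_face find_directed_edges_per_face find_directed_edges_per_face_alt
  rw [pvA_loop l 0 0 [] (by simp)]
  rw [pvB_loop l (pvOffsets l) 0 0 le_rfl (by rw [pvOffsets_eq]; simp)]
  simp
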